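-- pv_equiv track=rewrite | github.com/lotasfrod/ege23 | 19-21 py/19-21.py | f
-- ===== SOURCE A (Python) =====
-- def f(x,p):
--     if x>=40 or p>3:
--         return p == 3
--     else:
--         if p%2==0:
--             return f(x+1,p+1) or f((x*3)-2,p+1)
--         else:
--             return f(x+1,p+1) or f((x*3)-2,p+1)
-- ===== SOURCE B (Python) =====
-- def f(x, p):
--     stack = [(x, p)]
--     while stack:
--         cx, cp = stack.pop()
--         if cx >= 40 or cp > 3:
--             if cp == 3:
--                 return True
--             continue
--         stack.append((cx * 3 - 2, cp + 1))
--         stack.append((cx + 1, cp + 1))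
--     return False
-- ===== Notes on version B (the rewrite author's own statement) =====
-- stated objective: alternative
-- what changed: Replaces the binary OR-recursion (with its duplicated parity branches) by an explicit LIFO work-stack loop that returns True on the first p==3 leaf and False when the stack empties; Pre_ excludes only the region where A's recursion depth (4-p) exceeds the interpreter limit and A raises RecursionError.
-- outside the precondition, e.g. on f(0, -2000000000): A raises RecursionError, B does not finish within the time limit
import Mathlib
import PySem

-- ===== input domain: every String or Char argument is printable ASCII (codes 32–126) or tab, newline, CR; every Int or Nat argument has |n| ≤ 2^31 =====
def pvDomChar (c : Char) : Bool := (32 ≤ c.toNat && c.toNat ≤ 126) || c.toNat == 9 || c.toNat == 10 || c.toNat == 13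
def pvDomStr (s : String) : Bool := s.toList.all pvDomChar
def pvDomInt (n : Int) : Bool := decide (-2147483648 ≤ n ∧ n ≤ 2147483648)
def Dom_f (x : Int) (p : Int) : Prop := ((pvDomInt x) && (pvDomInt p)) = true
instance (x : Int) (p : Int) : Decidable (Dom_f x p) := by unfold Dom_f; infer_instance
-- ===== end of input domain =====

-- A = bounded game-tree OR-recursion; B = the same search run with an explicit LIFO
-- work-stack loop (one loop, the two identical parity branches of A collapsed);
-- alternative decomposition, results proved equal wherever Python A returns.


-- ===== PORT A =====
-- A's recursion always increments p and stops as soon as p > 3, so it makes at most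
-- (4 - p).toNat nested calls; `fuel` is exactly that totality bound (at fuel 0 we have
-- p ≥ 4, where A's base branch fires and returns `p == 3`).
def fAux : Nat → Int → Int → Bool
  | 0, _, p => p == 3
  | Nat.succ n, x, p =>
    if x ≥ 40 ∨ p > 3 then
      p == 3
    else
      if PySem.Int.mod p 2 == 0 then
        fAux n (x + 1) (p + 1) || fAux n (x * 3 - 2) (p + 1)
      else
        fAux n (x + 1) (p + 1) || fAux n (x * 3 - 2) (p + 1)

def f (x : Int) (p : Int) : Bool := fAux (4 - p).toNat x p

-- ===== PORT B =====
-- size of the search tree rooted at (x, p), with the same exact fuel bound; it is the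
-- totality fuel for the while-loop below (each pop consumes exactly one tree node)
def nodesAux : Nat → Int → Int → Nat
  | 0, _, _ => 1
  | Nat.succ n, x, p =>
    if x ≥ 40 ∨ p > 3 then 1
    else 1 + nodesAux n (x + 1) (p + 1) + nodesAux n (x * 3 - 2) (p + 1)

-- the while-loop of Source B: pop the top of the stack, test, or push the two children
def fLoopAux : Nat → List (Int × Int) → Bool
  | _, [] => false
  | 0, _ :: _ => false   -- never reached: the initial fuel counts every node the loop can pop
  | Nat.succ n, (cx, cp) :: rest =>
    if cx ≥ 40 ∨ cp > 3 then
      if cp == 3 then true else fLoopAux n rest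
    else
      fLoopAux n ((cx + 1, cp + 1) :: (cx * 3 - 2, cp + 1) :: rest)

def f_alt (x : Int) (p : Int) : Bool :=
  fLoopAux (nodesAux (4 - p).toNat x p) [(x, p)]

-- ===== PRECONDITION & SPEC =====
-- Pre_ excludes only the unboundedly deep recursion region (x ≤ 1 with x < 40, p ≤ 3 and
-- p < -8000): there A's recursion depth is 4 - p, which exceeds the interpreter's recursion
-- limit, so Python A never returns a value there (it raises RecursionError, e.g. at
-- (0, -2000000000), or dies on the way to that depth); everywhere A returns is admitted.
def Pre_f (x : Int) (p : Int) : Prop := x ≥ 40 ∨ p > 3 ∨ 2 ≤ x ∨ -8000 ≤ p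
instance (x : Int) (p : Int) : Decidable (Pre_f x p) := by unfold Pre_f; infer_instance
def pvWitness_f : Int × Int := (0, 0)

def Spec_f (x : Int) (p : Int) (out : Bool) : Prop := out = f_alt x p
instance (x : Int) (p : Int) (out : Bool) : Decidable (Spec_f x p out) := by unfold Spec_f; infer_instance

-- ===== CLAIM (what is proved, stated in full; the proofs are below) =====
def Claim_equal_f : Prop := ∀ (x : Int) (p : Int), Dom_f x p → Pre_f x p → Spec_f x p (f x p)

-- ===== LEMMAS AND PROOFS =====

-- A's value at a stack entry
def nodeVal (q : Int × Int) : Bool := f q.1 q.2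

-- number of pops the loop can still make from a stack
def stMeasure (st : List (Int × Int)) : Nat :=
  (st.map (fun q => nodesAux (4 - q.2).toNat q.1 q.2)).sum

theorem nodesAux_pos (n : Nat) (x p : Int) : 0 < nodesAux n x p := by
  cases n with
  | zero => simp [nodesAux]
  | succ m => simp only [nodesAux]; split <;> omega

theorem toNat_step (p : Int) (h : ¬(p > 3)) : (4 - p).toNat = (4 - (p + 1)).toNat + 1 := by
  omega

theorem f_base (x p : Int) (h : x ≥ 40 ∨ p > 3) : f x p = (p == 3) := by
  unfold f
  cases hn : (4 - p).toNat with
  | zero => rfl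
  | succ n => simp [fAux, h]

theorem f_expand (x p : Int) (h : ¬(x ≥ 40 ∨ p > 3)) :
    f x p = (f (x + 1) (p + 1) || f (x * 3 - 2) (p + 1)) := by
  have hp : ¬(p > 3) := fun hp => h (Or.inr hp)
  unfold f
  rw [toNat_step p hp]
  simp only [fAux, if_neg h]
  split <;> rfl

theorem nodes_expand (x p : Int) (h : ¬(x ≥ 40 ∨ p > 3)) :
    nodesAux (4 - p).toNat x p =
      1 + nodesAux (4 - (p + 1)).toNat (x + 1) (p + 1)
        + nodesAux (4 - (p + 1)).toNat (x * 3 - 2) (p + 1) := by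
  have hp : ¬(p > 3) := fun hp => h (Or.inr hp)
  rw [toNat_step p hp]
  simp [nodesAux, if_neg h]

-- the stack loop computes the OR of A's recursive result over the stack entries
theorem fLoopAux_eq_any (n : Nat) :
    ∀ st : List (Int × Int), stMeasure st ≤ n → fLoopAux n st = st.any nodeVal := by
  induction n with
  | zero =>
    intro st hm
    cases st with
    | nil => rfl
    | cons q rest =>
      exfalso
      have := nodesAux_pos (4 - q.2).toNat q.1 q.2
      simp [stMeasure] at hm
      omega
  | succ n ih =>
    intro st hm
    cases st with
    | nil => rfl
    | cons q rest =>
      obtain ⟨cx, cp⟩ := q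
      simp only [stMeasure, List.map_cons, List.sum_cons] at hm
      by_cases h : cx ≥ 40 ∨ cp > 3
      · have hb := f_base cx cp h
        have hpos := nodesAux_pos (4 - cp).toNat cx cp
        by_cases h3 : (cp == 3) = true
        · simp [fLoopAux, h, h3, List.any_cons, nodeVal, hb]
        · have hrest : stMeasure rest ≤ n := by
            simp only [stMeasure]; omega
          simp [fLoopAux, h, h3, List.any_cons, nodeVal, hb, ih rest hrest]
      · have hmeq := nodes_expand cx cp h
        have hnew :
            stMeasure ((cx + 1, cp + 1) :: (cx * 3 - 2, cp + 1) :: rest) ≤ n := by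
          simp only [stMeasure, List.map_cons, List.sum_cons] at *
          omega
        simp only [fLoopAux, if_neg h, ih _ hnew, List.any_cons]
        have hx := f_expand cx cp h
        simp only [nodeVal, hx]
        cases f (cx + 1) (cp + 1) <;> cases f (cx * 3 - 2) (cp + 1) <;> simp

-- ===== VERDICT (by name: the statement is the Claim_ definition above) =====
theorem f_spec : Claim_equal_f := by
  intro x p _ _
  unfold Spec_f f_alt
  have h := fLoopAux_eq_any (nodesAux (4 - p).toNat x p) [(x, p)]
      (by simp [stMeasure])
  rw [h]
  simp [nodeVal, f]
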